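-- pv_equiv track=rewrite | github.com/chris-gunawardena/http2mqtt | chip/chip_neopixels.py | fillColor
-- ===== SOURCE A (Python) =====
-- def fillColor(Colors):
--   stickColor=[]
--   temp =0
--
--   for i in range(0,8,2):
--      if (Colors & 128) == 128:
--         temp = 0b11000000
--      else:
--         temp = 0b10000000
--      if (Colors & 64) == 64:
--         temp = temp | 0b1100
--      else:
--         temp = temp | 0b1000
--      stickColor.append(temp)
--      Colors = Colors << 2
--   return stickColor
-- ===== SOURCE B (Python) =====
-- def fillColor(Colors):
--   TABLE = (0x88, 0x8C, 0xC8, 0xCC)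
--   return [TABLE[(Colors >> s) & 3] for s in (6, 4, 2, 0)]
-- ===== Notes on version B (the rewrite author's own statement) =====
-- stated objective: idiomatic
-- what changed: Replaces the mutate-and-left-shift loop with nested if/else and bitwise-or accumulation by a precomputed lookup table indexed by each two-bit group extracted directly via shift-and-mask.
import Mathlib
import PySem

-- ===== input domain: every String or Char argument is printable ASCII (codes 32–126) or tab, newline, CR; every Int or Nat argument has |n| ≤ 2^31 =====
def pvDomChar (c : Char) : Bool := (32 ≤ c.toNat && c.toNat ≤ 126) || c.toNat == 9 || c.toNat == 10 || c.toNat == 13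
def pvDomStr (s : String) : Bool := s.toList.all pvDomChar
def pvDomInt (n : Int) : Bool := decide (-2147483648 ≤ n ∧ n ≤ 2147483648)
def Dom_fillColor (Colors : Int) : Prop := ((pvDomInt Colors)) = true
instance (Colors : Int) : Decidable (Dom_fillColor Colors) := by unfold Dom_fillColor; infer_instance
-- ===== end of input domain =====

-- B replaces A's mutate-and-left-shift loop with if/else bit tests by a 4-entry lookup
-- table indexed by each 2-bit group of the byte (idiomatic; same cost).

-- ===== PORT A =====
-- literal port of A: fold over range(0,8,2) carrying (stickColor, temp, Colors)
def fillColor (Colors : Int) : List Int :=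
  ((PySem.List.pyRange 0 8 2).foldl
    (fun (st : List Int × Int × Int) _i =>
      let temp : Int := if PySem.Int.band st.2.2 128 = 128 then 0b11000000 else 0b10000000
      let temp : Int := if PySem.Int.band st.2.2 64 = 64 then PySem.Int.bor temp 0b1100
                        else PySem.Int.bor temp 0b1000
      (st.1 ++ [temp], temp, st.2.2 <<< (2 : Nat)))
    (([] : List Int), (0 : Int), Colors)).1

-- ===== PORT B =====
-- literal port of B; TABLE[(Colors >> s) & 3] is pyGet? (the index is provably in 0..3,
-- so Python never raises; .getD 0 only discharges the Option)
def fillColor_alt (Colors : Int) : List Int :=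
  let table : List Int := [0x88, 0x8C, 0xC8, 0xCC]
  ([6, 4, 2, 0] : List Nat).map
    (fun s => (PySem.List.pyGet? table (PySem.Int.band (Colors >>> s) 3)).getD 0)

-- ===== PRECONDITION & SPEC =====
def Spec_fillColor (Colors : Int) (out : List Int) : Prop := out = fillColor_alt Colors
instance (Colors : Int) (out : List Int) : Decidable (Spec_fillColor Colors out) := by unfold Spec_fillColor; infer_instance

-- ===== CLAIM (what is proved, stated in full; the proofs are below) =====
def Claim_equal_fillColor : Prop := ∀ (Colors : Int), Dom_fillColor Colors → Spec_fillColor Colors (fillColor Colors)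

-- ===== LEMMAS AND PROOFS =====

lemma nat_and128 (n : Nat) : (n &&& 128 : Nat) = (n / 128 % 2) * 128 := by
  have := Nat.and_two_pow n 7
  norm_num at this
  rw [this, Nat.testBit, Nat.shiftRight_eq_div_pow]
  rcases Nat.mod_two_eq_zero_or_one (n / 128) with h | h <;> simp [h]

lemma nat_and64 (n : Nat) : (n &&& 64 : Nat) = (n / 64 % 2) * 64 := by
  have := Nat.and_two_pow n 6
  norm_num at this
  rw [this, Nat.testBit, Nat.shiftRight_eq_div_pow]
  rcases Nat.mod_two_eq_zero_or_one (n / 64) with h | h <;> simp [h]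

lemma nat_and3 (n : Nat) : (n &&& 3 : Nat) = n % 4 := by
  have := Nat.and_two_pow_sub_one_eq_mod n 2
  norm_num at this; exact this

lemma band128 (a : Int) : PySem.Int.band a 128 = 128 * (a / 128 % 2) := by
  unfold PySem.Int.band
  rcases (by omega : 0 ≤ a ∨ a < 0) with h | h
  · rw [if_pos h, if_pos (by norm_num : (0:Int) ≤ 128)]
    rw [show Int.toNat 128 = 128 from rfl, nat_and128]
    have ha : ((a.toNat : Int)) = a := Int.toNat_of_nonneg h
    omega
  · rw [if_neg (by omega), if_pos (by norm_num : (0:Int) ≤ 128)]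
    rw [show Int.toNat 128 = 128 from rfl, Nat.and_comm, nat_and128]
    have ha : (((-a - 1).toNat : Int)) = -a - 1 := Int.toNat_of_nonneg (by omega)
    omega

lemma band64 (a : Int) : PySem.Int.band a 64 = 64 * (a / 64 % 2) := by
  unfold PySem.Int.band
  rcases (by omega : 0 ≤ a ∨ a < 0) with h | h
  · rw [if_pos h, if_pos (by norm_num : (0:Int) ≤ 64)]
    rw [show Int.toNat 64 = 64 from rfl, nat_and64]
    have ha : ((a.toNat : Int)) = a := Int.toNat_of_nonneg h
    omega
  · rw [if_neg (by omega), if_pos (by norm_num : (0:Int) ≤ 64)]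
    rw [show Int.toNat 64 = 64 from rfl, Nat.and_comm, nat_and64]
    have ha : (((-a - 1).toNat : Int)) = -a - 1 := Int.toNat_of_nonneg (by omega)
    omega

lemma band3 (a : Int) : PySem.Int.band a 3 = a % 4 := by
  unfold PySem.Int.band
  rcases (by omega : 0 ≤ a ∨ a < 0) with h | h
  · rw [if_pos h, if_pos (by norm_num : (0:Int) ≤ 3)]
    rw [show Int.toNat 3 = 3 from rfl, nat_and3]
    have ha : ((a.toNat : Int)) = a := Int.toNat_of_nonneg h
    omega
  · rw [if_neg (by omega), if_pos (by norm_num : (0:Int) ≤ 3)]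
    rw [show Int.toNat 3 = 3 from rfl, Nat.and_comm, nat_and3]
    have ha : (((-a - 1).toNat : Int)) = -a - 1 := Int.toNat_of_nonneg (by omega)
    omega

lemma shl2 (a : Int) : a <<< (2 : Nat) = 4 * a := by
  rw [Int.shiftLeft_eq]; ring

-- one element of A's loop equals one table lookup of B
lemma key (a : Int) :
    (if PySem.Int.band a 64 = 64 then
       PySem.Int.bor (if PySem.Int.band a 128 = 128 then 192 else 128) 12
     else
       PySem.Int.bor (if PySem.Int.band a 128 = 128 then 192 else 128) 8)
    = (PySem.List.pyGet? [136, 140, 200, 204] (a / 64 % 4)).getD 0 := by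
  rw [band128, band64]
  have hj : a / 64 % 4 = 0 ∨ a / 64 % 4 = 1 ∨ a / 64 % 4 = 2 ∨ a / 64 % 4 = 3 := by omega
  rcases hj with h | h | h | h <;> rw [h] <;>
    [ (rw [show a / 128 % 2 = 0 by omega, show a / 64 % 2 = 0 by omega]);
      (rw [show a / 128 % 2 = 0 by omega, show a / 64 % 2 = 1 by omega]);
      (rw [show a / 128 % 2 = 1 by omega, show a / 64 % 2 = 0 by omega]);
      (rw [show a / 128 % 2 = 1 by omega, show a / 64 % 2 = 1 by omega]) ] <;>
    decide

-- ===== VERDICT (by name: the statement is the Claim_ definition above) =====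
theorem fillColor_spec : Claim_equal_fillColor := by
  intro C _
  unfold Spec_fillColor fillColor fillColor_alt
  have hr : PySem.List.pyRange 0 8 2 = [0, 2, 4, 6] := by decide
  rw [hr]
  simp only [List.foldl, shl2, band3]
  norm_num
  rw [show (C >>> (6 : Int)) = C / 64 by rw [show ((6:Int)) = ((6:Nat):Int) by norm_num, Int.shiftRight_natCast_right, Int.shiftRight_eq_div_pow]; norm_num,
      show (C >>> (4 : Int)) = C / 16 by rw [show ((4:Int)) = ((4:Nat):Int) by norm_num, Int.shiftRight_natCast_right, Int.shiftRight_eq_div_pow]; norm_num,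
      show (C >>> (2 : Int)) = C / 4 by rw [show ((2:Int)) = ((2:Nat):Int) by norm_num, Int.shiftRight_natCast_right, Int.shiftRight_eq_div_pow]; norm_num,
      show (C >>> (0 : Int)) = C by rw [show ((0:Int)) = ((0:Nat):Int) by norm_num, Int.shiftRight_natCast_right, Int.shiftRight_eq_div_pow]; norm_num]
  refine ⟨?_, ?_, ?_, ?_⟩
  · rw [key C]
  · rw [key (4 * C), show 4 * C / 64 % 4 = C / 16 % 4 by omega]
  · rw [key (4 * (4 * C)), show 4 * (4 * C) / 64 % 4 = C / 4 % 4 by omega]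
  · rw [key (4 * (4 * (4 * C))), show 4 * (4 * (4 * C)) / 64 % 4 = C % 4 by omega]
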